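-- pv_equiv track=rewrite | github.com/7005-sudeep/PYTHON--Portfolio | Finding max delta (latency).py | find_max_performance_delta
-- ===== SOURCE A (Python) =====
-- def find_max_performance_delta(data_points):
--     # Initialize 'min_val' to infinity so any first number is smaller
--     min_val = float('inf')
--     max_delta = 0
--
--     for current_val in data_points:
--         # 1. Update the 'Lowest Point' seen so far
--         if current_val < min_val:
--             min_val = current_val
--
--         # 2. Calculate potential delta (current - lowest)
--         current_delta = current_val - min_val
--
--         # 3. Update 'Global Max Delta' if this one is better
--         if current_delta > max_delta:
--             max_delta = current_delta
--
--     return max_delta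
-- ===== SOURCE B (Python) =====
-- def find_max_performance_delta(data_points):
--     # Divide and conquer: for a segment return (min, max, best delta inside it);
--     # merging combines the halves' answers with (max of right) - (min of left).
--     # Recursion depth is only log2(n).
--     def dc(seg):
--         if len(seg) == 1:
--             v = seg[0]
--             return (v, v, 0)
--         k = len(seg) // 2
--         mn1, mx1, d1 = dc(seg[:k])
--         mn2, mx2, d2 = dc(seg[k:])
--         return (min(mn1, mn2), max(mx1, mx2), max(d1, d2, mx2 - mn1))
--     if not data_points:
--         return 0
--     return dc(data_points)[2]
-- ===== Notes on version B (the rewrite author's own statement) =====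
-- stated objective: alternative
-- what changed: Replaces A's single streaming scan with running min/max-delta scalars by a divide-and-conquer recursion that returns (min, max, best delta) per segment and merges halves via max-of-right minus min-of-left.
import Mathlib
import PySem

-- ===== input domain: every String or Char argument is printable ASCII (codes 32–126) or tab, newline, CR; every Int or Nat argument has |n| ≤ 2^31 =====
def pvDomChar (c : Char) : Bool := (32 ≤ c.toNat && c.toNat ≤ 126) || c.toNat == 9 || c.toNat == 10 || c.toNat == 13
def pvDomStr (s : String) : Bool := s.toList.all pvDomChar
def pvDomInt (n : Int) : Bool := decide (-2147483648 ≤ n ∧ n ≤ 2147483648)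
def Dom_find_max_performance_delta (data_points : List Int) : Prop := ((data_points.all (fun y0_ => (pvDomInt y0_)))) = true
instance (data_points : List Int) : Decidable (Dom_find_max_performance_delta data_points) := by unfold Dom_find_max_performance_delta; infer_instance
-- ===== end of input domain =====

-- B replaces A's single streaming min/max-delta scan by a divide-and-conquer on halves (objective: alternative algorithm).

-- ===== PORT A =====
-- A's single loop carries (min_val, max_delta); min_val = none plays float('inf').
def find_max_performance_delta (data_points : List Int) : Int :=
  (data_points.foldl
    (fun (st : Option Int × Int) current_val =>
      let min_val : Int :=
        match st.1 with
        | none => current_val                 -- anything is < float('inf')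
        | some m => if current_val < m then current_val else m
      let current_delta := current_val - min_val
      (some min_val, if current_delta > st.2 then current_delta else st.2))
    (none, 0)).2

-- ===== PORT B =====
-- Source B's dc helper: (min, max, best delta) of a nonempty segment, split at len//2.
def pvDc : List Int → Int × Int × Int
  | [] => (0, 0, 0)                           -- never reached from the entry point
  | [v] => (v, v, 0)
  | v :: w :: rest =>
    let l := v :: w :: rest
    let k := l.length / 2
    let r1 := pvDc (l.take k)
    let r2 := pvDc (l.drop k)
    (min r1.1 r2.1, max r1.2.1 r2.2.1, max (max r1.2.2 r2.2.2) (r2.2.1 - r1.1))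
termination_by l => l.length
decreasing_by
  · simp [List.length_take]; omega
  · simp; omega

def find_max_performance_delta_alt (data_points : List Int) : Int :=
  match data_points with
  | [] => 0
  | _ :: _ => (pvDc data_points).2.2

-- ===== PRECONDITION & SPEC =====
def Spec_find_max_performance_delta (data_points : List Int) (out : Int) : Prop := out = find_max_performance_delta_alt data_points
instance (data_points : List Int) (out : Int) : Decidable (Spec_find_max_performance_delta data_points out) := by unfold Spec_find_max_performance_delta; infer_instance

-- ===== CLAIM (what is proved, stated in full; the proofs are below) =====
def Claim_equal_find_max_performance_delta : Prop := ∀ (data_points : List Int), Dom_find_max_performance_delta data_points → Spec_find_max_performance_delta data_points (find_max_performance_delta data_points)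

-- ===== LEMMAS AND PROOFS =====

-- pvBf m l = the best delta over l where the running minimum starts at m (proof-only abstraction of A's loop).
def pvBf (m : Int) : List Int → Int
  | [] => 0
  | v :: t => max (v - min m v) (pvBf (min m v) t)

lemma pvBf_nonneg (l : List Int) : ∀ m : Int, 0 ≤ pvBf m l := by
  induction l with
  | nil => intro m; simp [pvBf]
  | cons v t ih => intro m; simp only [pvBf]; have := ih (min m v); omega

-- A's loop from state (some m, b), 0 ≤ b, computes max b (pvBf m l).
lemma pv_loopA (l : List Int) : ∀ (m b : Int), 0 ≤ b →
    (l.foldl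
      (fun (st : Option Int × Int) current_val =>
        let min_val : Int :=
          match st.1 with
          | none => current_val
          | some m => if current_val < m then current_val else m
        let current_delta := current_val - min_val
        (some min_val, if current_delta > st.2 then current_delta else st.2))
      (some m, b)).2 = max b (pvBf m l) := by
  induction l with
  | nil => intro m b hb; simp [pvBf]; omega
  | cons v t ih =>
    intro m b hb
    simp only [List.foldl_cons, pvBf]
    have h1 : (if v < m then v else m) = min m v := by omega
    simp only [h1]
    rw [ih (min m v) _ (by omega)]
    have := pvBf_nonneg t (min m v)
    omega

lemma pv_foldl_min_min (l : List Int) : ∀ a b : Int,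
    l.foldl min (min a b) = min a (l.foldl min b) := by
  induction l with
  | nil => intro a b; simp
  | cons v t ih =>
    intro a b
    simp only [List.foldl_cons]
    rw [min_assoc, ih]

lemma pv_foldl_max_max (l : List Int) : ∀ a b : Int,
    l.foldl max (max a b) = max a (l.foldl max b) := by
  induction l with
  | nil => intro a b; simp
  | cons v t ih =>
    intro a b
    simp only [List.foldl_cons]
    rw [max_assoc, ih]

lemma pvBf_append (l1 : List Int) : ∀ (l2 : List Int) (m : Int),
    pvBf m (l1 ++ l2) = max (pvBf m l1) (pvBf (l1.foldl min m) l2) := by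
  induction l1 with
  | nil =>
    intro l2 m
    have := pvBf_nonneg l2 m
    simp [pvBf]
    omega
  | cons v t ih =>
    intro l2 m
    simp only [List.cons_append, pvBf, List.foldl_cons]
    rw [ih]
    omega

lemma pvBf_self (t : List Int) (v : Int) : pvBf v (v :: t) = pvBf v t := by
  simp only [pvBf]
  have h : min v v = v := by omega
  rw [h]
  have := pvBf_nonneg t v
  omega

-- The key split: best delta of v::t with floor m = max of (max of v::t) - m and the pure best of v::t.
lemma pvBf_cons_split (t : List Int) : ∀ (v m : Int),
    pvBf m (v :: t) = max (t.foldl max v - m) (pvBf v (v :: t)) := by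
  induction t with
  | nil => intro v m; simp [pvBf]; omega
  | cons w t' ih =>
    intro v m
    have e4 : pvBf w (w :: t') = pvBf w t' := pvBf_self t' w
    have e1 : pvBf m (v :: w :: t') = max (v - min m v) (pvBf (min m v) (w :: t')) := rfl
    have e2 := ih w (min m v)
    have e3 := ih w v
    rw [e4] at e2 e3
    have e5 : pvBf v (v :: w :: t') = pvBf v (w :: t') := pvBf_self (w :: t') v
    have e6 : (w :: t').foldl max v = max v (t'.foldl max w) := by
      simp only [List.foldl_cons]
      rw [pv_foldl_max_max]
    have e7 := pvBf_nonneg t' w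
    rw [e1, e2, e5, e3, e6]
    omega

-- dc is correct: on a nonempty list v :: t it returns (min, max, pvBf v t).
lemma pvDc_correct : ∀ (n : ℕ) (l : List Int) (v : Int) (t : List Int),
    l.length ≤ n → l = v :: t →
    pvDc l = (t.foldl min v, t.foldl max v, pvBf v t) := by
  intro n
  induction n with
  | zero => intro l v t hle he; subst he; simp at hle
  | succ n ih =>
    intro l v t hle he
    subst he
    cases t with
    | nil => simp [pvDc, pvBf]
    | cons w rest =>
      rw [pvDc]
      set l : List Int := v :: w :: rest with hl
      set k : ℕ := l.length / 2 with hk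
      have hll : l.length = rest.length + 2 := by simp [hl]
      have hk1 : 1 ≤ k ∧ k < l.length := by constructor <;> omega
      obtain ⟨k', hk'⟩ : ∃ k', k = k' + 1 := ⟨k - 1, by omega⟩
      have h1 : l.take k = v :: (w :: rest).take k' := by
        rw [hl, hk']
        rfl
      obtain ⟨v2, t2, h2⟩ :=
        List.exists_cons_of_ne_nil (l := l.drop k)
          (by
            intro hnil
            have := congrArg List.length hnil
            simp [List.length_drop] at this
            omega)
      have hlen1 : (l.take k).length ≤ n := by
        rw [List.length_take]
        omega
      have hlen2 : (l.drop k).length ≤ n := by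
        rw [List.length_drop]
        omega
      rw [ih _ _ _ hlen1 h1, ih _ _ _ hlen2 h2]
      set t1 : List Int := (w :: rest).take k' with ht1
      have happ : l = (v :: t1) ++ (v2 :: t2) := by
        rw [← h1, ← h2, List.take_append_drop]
      have ht : w :: rest = t1 ++ v2 :: t2 := by
        have : v :: (w :: rest) = v :: (t1 ++ v2 :: t2) := by
          rw [← hl, happ]
          rfl
        injection this
      -- min
      have hmin2 : (v2 :: t2).foldl min (t1.foldl min v) = min (t1.foldl min v) (t2.foldl min v2) := by
        simp only [List.foldl_cons]
        rw [pv_foldl_min_min]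
      have hmin : (w :: rest).foldl min v = min (t1.foldl min v) (t2.foldl min v2) := by
        have : (w :: rest).foldl min v = (t1 ++ v2 :: t2).foldl min v := by rw [← ht]
        rw [this, List.foldl_append, hmin2]
      -- max
      have hmax2 : (v2 :: t2).foldl max (t1.foldl max v) = max (t1.foldl max v) (t2.foldl max v2) := by
        simp only [List.foldl_cons]
        rw [pv_foldl_max_max]
      have hmax : (w :: rest).foldl max v = max (t1.foldl max v) (t2.foldl max v2) := by
        have : (w :: rest).foldl max v = (t1 ++ v2 :: t2).foldl max v := by rw [← ht]
        rw [this, List.foldl_append, hmax2]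
      -- bf
      have hbf : pvBf v (w :: rest) = max (pvBf v t1) (max (t2.foldl max v2 - t1.foldl min v) (pvBf v2 t2)) := by
        have : pvBf v (w :: rest) = pvBf v (t1 ++ v2 :: t2) := by rw [← ht]
        rw [this, pvBf_append, pvBf_cons_split, pvBf_self]
      rw [hmin, hmax, hbf]
      simp only [Prod.mk.injEq]
      exact ⟨trivial, trivial, by omega⟩

-- ===== VERDICT (by name: the statement is the Claim_ definition above) =====
theorem find_max_performance_delta_spec : Claim_equal_find_max_performance_delta := by
  intro data_points _
  unfold Spec_find_max_performance_delta
  cases data_points with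
  | nil => rfl
  | cons v t =>
    unfold find_max_performance_delta find_max_performance_delta_alt
    simp only [List.foldl_cons]
    rw [show (if (v : Int) - v > 0 then v - v else 0) = (0 : Int) by simp]
    rw [pv_loopA t v 0 (le_refl 0)]
    rw [pvDc_correct (v :: t).length (v :: t) v t (le_refl _) rfl]
    exact max_eq_right (pvBf_nonneg t v)
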